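-- pv_equiv track=rewrite | github.com/bnyorukoglu/Orthogonal_Design | OrthogonalDesign/orthogonalDesign.py | findBiggestNumber
-- ===== SOURCE A (Python) =====
-- def findBiggestNumber(parameterTuple):
--     if(parameterTuple[0]!='-'):
--         maxa = parameterTuple[0]
--     else:
--         maxa = parameterTuple[1]
--     for i in parameterTuple:
--         for j in parameterTuple:
--             if(parameterTuple[0]!='-'):
--                 if i > j and i > maxa:
--                     maxa = i
--     return maxa
-- ===== SOURCE B (Python) =====
-- def findBiggestNumber(parameterTuple):
--     return sorted(parameterTuple)[-1]
-- ===== Notes on version B (the rewrite author's own statement) =====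
-- stated objective: faster
-- what changed: Replaces the nested quadratic running-max double loop (with its dead '-' branch, which can never fire on integer input) by sort-then-take-last of the sorted copy.
import Mathlib
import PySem

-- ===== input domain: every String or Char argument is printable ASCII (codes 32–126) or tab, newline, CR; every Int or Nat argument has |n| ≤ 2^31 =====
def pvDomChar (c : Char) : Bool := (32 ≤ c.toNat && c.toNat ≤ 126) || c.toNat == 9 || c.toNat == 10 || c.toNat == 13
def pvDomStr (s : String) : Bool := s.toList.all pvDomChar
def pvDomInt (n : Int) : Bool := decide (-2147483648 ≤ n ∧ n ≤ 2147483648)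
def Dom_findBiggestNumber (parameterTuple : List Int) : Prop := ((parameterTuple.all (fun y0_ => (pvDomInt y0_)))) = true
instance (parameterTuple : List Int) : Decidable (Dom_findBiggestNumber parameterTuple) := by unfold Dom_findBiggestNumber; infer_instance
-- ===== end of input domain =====

-- B replaces A's nested running-max double loop by sort-then-take-last (simpler).

-- ===== PORT A =====
-- Python's `i != '-'` for an Int i and the str '-' is always True (int != str).
def pyIntNeDashStr (_ : Int) : Bool := true

def findBiggestNumber (parameterTuple : List Int) : Int :=
  -- parameterTuple[0] / parameterTuple[1]: Pre_ excludes the empty list (IndexError);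
  -- the else branch is unreachable on Int input since pyIntNeDashStr is always true.
  let maxa :=
    if pyIntNeDashStr (PySem.List.pyGetD parameterTuple 0 0) then
      PySem.List.pyGetD parameterTuple 0 0
    else
      PySem.List.pyGetD parameterTuple 1 0
  parameterTuple.foldl (fun maxa i =>
    parameterTuple.foldl (fun maxa j =>
      if pyIntNeDashStr (PySem.List.pyGetD parameterTuple 0 0) then
        (if i > j ∧ i > maxa then i else maxa)
      else maxa) maxa) maxa

-- ===== PORT B =====
def findBiggestNumber_alt (parameterTuple : List Int) : Int :=
  PySem.List.pyGetD (PySem.List.sorted parameterTuple (fun x => x) false) (-1) 0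

-- ===== PRECONDITION & SPEC =====
-- Pre_ excludes exactly the empty list, on which Python A raises IndexError (parameterTuple[0]).
def Pre_findBiggestNumber (parameterTuple : List Int) : Prop := parameterTuple ≠ []
instance (parameterTuple : List Int) : Decidable (Pre_findBiggestNumber parameterTuple) := by unfold Pre_findBiggestNumber; infer_instance

def pvWitness_findBiggestNumber : List Int := [3, 1, 2]

def Spec_findBiggestNumber (parameterTuple : List Int) (out : Int) : Prop := out = findBiggestNumber_alt parameterTuple
instance (parameterTuple : List Int) (out : Int) : Decidable (Spec_findBiggestNumber parameterTuple out) := by unfold Spec_findBiggestNumber; infer_instance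

-- ===== CLAIM (what is proved, stated in full; the proofs are below) =====
def Claim_equal_findBiggestNumber : Prop := ∀ (parameterTuple : List Int), Dom_findBiggestNumber parameterTuple → Pre_findBiggestNumber parameterTuple → Spec_findBiggestNumber parameterTuple (findBiggestNumber parameterTuple)

-- ===== LEMMAS AND PROOFS =====

-- A's inner loop: once the accumulator equals i, it never changes (i > i is false).
theorem innerFold_self (i : Int) (l : List Int) :
    l.foldl (fun m j => if i > j ∧ i > m then i else m) i = i := by
  induction l with
  | nil => rfl
  | cons j t ih => simpa using ih

-- Characterisation of A's inner loop.
theorem innerFold_eq (i m : Int) (l : List Int) :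
    l.foldl (fun m j => if i > j ∧ i > m then i else m) m
      = if m < i ∧ (∃ j ∈ l, j < i) then i else m := by
  induction l generalizing m with
  | nil => simp
  | cons j t ih =>
    simp only [List.foldl_cons]
    by_cases h1 : i > j ∧ i > m
    · rw [if_pos h1, innerFold_self]
      rw [if_pos ⟨h1.2, j, by simp, h1.1⟩]
    · rw [if_neg h1, ih]
      by_cases hm : m < i
      · rcases not_and_or.mp h1 with hj | hm'
        · have hj' : ¬ j < i := by omega
          simp [hm, hj']
        · omega
      · simp [hm]

-- A's outer loop is the running max, while the accumulator stays a member of xs.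
theorem outerFold_eq_max (xs : List Int) (l : List Int) (m : Int)
    (hl : ∀ i ∈ l, i ∈ xs) (hm : m ∈ xs) :
    l.foldl (fun m i => xs.foldl (fun m j => if i > j ∧ i > m then i else m) m) m
      = l.foldl max m := by
  induction l generalizing m with
  | nil => rfl
  | cons i t ih =>
    have hi : i ∈ xs := hl i (by simp)
    simp only [List.foldl_cons]
    rw [innerFold_eq]
    by_cases hm' : m < i
    · rw [if_pos ⟨hm', m, hm, hm'⟩, max_eq_right (le_of_lt hm')]
      exact ih _ (fun y hy => hl y (List.mem_cons_of_mem _ hy)) hi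
    · rw [if_neg (by tauto), max_eq_left (by omega)]
      exact ih _ (fun y hy => hl y (List.mem_cons_of_mem _ hy)) hm

-- In a (≤)-pairwise list, the last element bounds every member.
theorem le_getLast_of_pairwise (l : List Int) (hp : l.Pairwise (· ≤ ·)) (hne : l ≠ [])
    (y : Int) (hy : y ∈ l) : y ≤ l.getLast hne := by
  induction l with
  | nil => exact absurd rfl hne
  | cons a t ih =>
    cases t with
    | nil => simp at hy; simpa [List.getLast] using hy.le
    | cons b u =>
      rw [List.getLast_cons (by simp)]
      rcases List.mem_cons.mp hy with rfl | hy'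
      · exact le_trans ((List.pairwise_cons.mp hp).1 _ (List.getLast_mem _))
          (le_refl _)
      · exact ih (List.pairwise_cons.mp hp).2 (by simp) hy'

theorem findBiggestNumber_eq_max (x : Int) (t : List Int) :
    findBiggestNumber (x :: t) = t.foldl max x := by
  unfold findBiggestNumber
  simp only [pyIntNeDashStr, if_true, PySem.List.pyGetD_zero_cons]
  rw [outerFold_eq_max (x :: t) (x :: t) x (fun i hi => hi) (by simp)]
  simp

theorem findBiggestNumber_alt_eq_max (x : Int) (t : List Int) :
    findBiggestNumber_alt (x :: t) = t.foldl max x := by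
  unfold findBiggestNumber_alt
  set s := PySem.List.sorted (x :: t) (fun x => x) false with hs
  have hperm : s.Perm (x :: t) := PySem.List.sorted_perm _ _ _
  have hne : s ≠ [] := by
    intro h
    have := hperm.length_eq
    simp [h] at this
  rw [PySem.List.pyGetD_neg_one s 0 hne]
  have hpair : s.Pairwise (fun a b => a ≤ b) := PySem.List.sorted_pairwise _ _
  have hmem_iff : ∀ y, y ∈ s ↔ y ∈ x :: t := fun y => hperm.mem_iff
  -- the last of s is ≥ every member of x :: t, and t.foldl max x is too; both are members
  have hlast_mem : s.getLast hne ∈ x :: t := (hmem_iff _).mp (List.getLast_mem hne)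
  have hmax := PySem.List.le_foldl_max t x
  have hmax_mem : t.foldl max x ∈ x :: t := by
    rcases PySem.List.foldl_max_mem t x with h | h
    · simp [h]
    · simp [h]
  apply le_antisymm
  · rcases List.mem_cons.mp hlast_mem with h | h
    · rw [h]; exact hmax.1
    · exact hmax.2 _ h
  · exact le_getLast_of_pairwise s hpair hne _ ((hmem_iff _).mpr hmax_mem)

-- ===== VERDICT (by name: the statement is the Claim_ definition above) =====
theorem findBiggestNumber_spec : Claim_equal_findBiggestNumber := by
  intro xs _ hpre
  cases xs with
  | nil => exact absurd rfl hpre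
  | cons x t =>
    show findBiggestNumber (x :: t) = findBiggestNumber_alt (x :: t)
    rw [findBiggestNumber_eq_max, findBiggestNumber_alt_eq_max]
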